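-- pv_equiv track=rewrite | github.com/foones/dharma | misc/hearts/gui/main.py | rotate_players
-- ===== SOURCE A (Python) =====
-- def rotate_players(players, player):
--     """Rotate the list of players for 'player' to be the first
--        element in the list."""
--     prev = []
--     post = []
--     self_seen = False
--     for p in players:
--         if self_seen:
--             prev.append(p)
--         else:
--             post.append(p)
--         if p == player:
--             self_seen = True
--     return prev + post
-- ===== SOURCE B (Python) =====
-- def rotate_players(players, player):
--     """Rotate the list of players for 'player' to be the first
--        element in the list."""
--     try:
--         i = players.index(player)
--     except ValueError:
--         return players[:]
--     return players[i + 1:] + players[:i + 1]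
-- ===== Notes on version B (the rewrite author's own statement) =====
-- stated objective: simpler
-- what changed: Replaces the flag-driven loop with two accumulator lists by locating the pivot with players.index and slicing around it (players[i+1:] + players[:i+1]), copying the list when the player is absent.
import Mathlib
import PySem

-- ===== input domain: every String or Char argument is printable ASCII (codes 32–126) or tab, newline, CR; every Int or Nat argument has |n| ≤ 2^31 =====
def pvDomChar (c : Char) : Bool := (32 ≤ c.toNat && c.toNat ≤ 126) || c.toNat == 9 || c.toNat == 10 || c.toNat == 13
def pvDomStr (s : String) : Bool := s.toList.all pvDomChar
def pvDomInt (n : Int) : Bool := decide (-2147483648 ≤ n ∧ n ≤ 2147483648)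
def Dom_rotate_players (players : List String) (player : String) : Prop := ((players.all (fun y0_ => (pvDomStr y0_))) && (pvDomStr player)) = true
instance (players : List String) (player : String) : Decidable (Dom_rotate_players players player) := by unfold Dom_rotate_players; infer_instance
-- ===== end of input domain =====

-- B replaces A's flag-driven loop with two accumulators by index-then-slice; return values proved equal (A mutates nothing).

-- ===== PORT A =====
-- literal port of A's loop: state (prev, post, self_seen), appended to in order
-- loop body of A: append p to prev if self_seen else to post, then set the flag on match
def rotStep (player : String) (s : List String × List String × Bool) (p : String) :
    List String × List String × Bool :=
  let s' := if s.2.2 then (s.1 ++ [p], s.2.1, s.2.2) else (s.1, s.2.1 ++ [p], s.2.2)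
  if p == player then (s'.1, s'.2.1, true) else s'

def rotate_players (players : List String) (player : String) : List String :=
  let st := players.foldl (rotStep player) ([], [], false)
  st.1 ++ st.2.1

-- ===== PORT B =====
def rotate_players_alt (players : List String) (player : String) : List String :=
  match PySem.List.index? players player with
  | none => players
  | some i =>
      PySem.List.slice players (some ((i : Int) + 1)) none
        ++ PySem.List.slice players none (some ((i : Int) + 1))

-- ===== PRECONDITION & SPEC =====
def Spec_rotate_players (players : List String) (player : String) (out : List String) : Prop := out = rotate_players_alt players player
instance (players : List String) (player : String) (out : List String) : Decidable (Spec_rotate_players players player out) := by unfold Spec_rotate_players; infer_instance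

-- ===== CLAIM (what is proved, stated in full; the proofs are below) =====
def Claim_equal_rotate_players : Prop := ∀ (players : List String) (player : String), Dom_rotate_players players player → Spec_rotate_players players player (rotate_players players player)

-- ===== LEMMAS AND PROOFS =====

theorem rotStep_true (player p : String) (prev post : List String) :
    rotStep player (prev, post, true) p = (prev ++ [p], post, true) := by
  by_cases h : (p == player) = true <;> simp [rotStep, h]

theorem rotStep_false (player p : String) (prev post : List String) :
    rotStep player (prev, post, false) p
      = (prev, post ++ [p], p == player) := by
  by_cases h : (p == player) = true <;> simp [rotStep, h]

-- once self_seen is true, every element goes to prev and the flag stays true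
theorem rotate_fold_true (player : String) (l prev post : List String) :
    l.foldl (rotStep player) (prev, post, true) = (prev ++ l, post, true) := by
  induction l generalizing prev with
  | nil => simp
  | cons x xs ih => simp [rotStep_true, ih]

-- before the flag is set, the fold is characterised by the first index of player
theorem rotate_fold_false (player : String) (l prev post : List String) :
    l.foldl (rotStep player) (prev, post, false)
      = match PySem.List.index? l player with
        | none => (prev, post ++ l, false)
        | some i => (prev ++ l.drop (i + 1), post ++ l.take (i + 1), true) := by
  induction l generalizing prev post with
  | nil => simp [PySem.List.index?]
  | cons x xs ih =>
      rw [List.foldl_cons, rotStep_false]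
      by_cases h : x = player
      · subst h
        rw [PySem.List.index?_cons_self]
        simp [rotate_fold_true]
      · rw [PySem.List.index?_cons_of_ne xs h]
        have hb : (x == player) = false := by simp [h]
        rw [hb, ih]
        cases hi : PySem.List.index? xs player with
        | none => simp
        | some i => simp

-- ===== VERDICT (by name: the statement is the Claim_ definition above) =====
theorem rotate_players_spec : Claim_equal_rotate_players := by
  intro players player _
  show rotate_players players player = rotate_players_alt players player
  unfold rotate_players rotate_players_alt
  rw [rotate_fold_false]
  cases hi : PySem.List.index? players player with
  | none => simp
  | some i =>
      have h1 : PySem.List.slice players (some ((i : Int) + 1)) none = players.drop (i + 1) := by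
        have := PySem.List.slice_from_natCast players (i + 1)
        simpa [Int.natCast_add] using this
      have h2 : PySem.List.slice players none (some ((i : Int) + 1)) = players.take (i + 1) := by
        have := PySem.List.slice_to_natCast players (i + 1)
        simpa [Int.natCast_add] using this
      simp [h1, h2]
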